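-- pv_equiv track=rewrite | github.com/justaszie/LS_PY110 | exercises/practice/p14.py | seven_eleven
-- ===== SOURCE A (Python) =====
-- def seven_eleven(number):
--     if number < 1:
--         return 0
--
--     multiples = []
--     for x in range(1, number):
--         if x % 7 == 0 or x % 11 == 0:
--             multiples.append(x)
--
--     return sum(multiples)
-- ===== SOURCE B (Python) =====
-- def seven_eleven(number):
--     if number < 1:
--         return 0
--
--     def tri(k):
--         m = (number - 1) // k
--         return k * (m * (m + 1) // 2)
--
--     return tri(7) + tri(11) - tri(77)
-- ===== Notes on version B (the rewrite author's own statement) =====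
-- stated objective: faster
-- what changed: Replaced the O(n) loop collecting multiples of 7 or 11 below n with an O(1) inclusion-exclusion of arithmetic-series sums over multiples of 7, 11 and 77.
import Mathlib
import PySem

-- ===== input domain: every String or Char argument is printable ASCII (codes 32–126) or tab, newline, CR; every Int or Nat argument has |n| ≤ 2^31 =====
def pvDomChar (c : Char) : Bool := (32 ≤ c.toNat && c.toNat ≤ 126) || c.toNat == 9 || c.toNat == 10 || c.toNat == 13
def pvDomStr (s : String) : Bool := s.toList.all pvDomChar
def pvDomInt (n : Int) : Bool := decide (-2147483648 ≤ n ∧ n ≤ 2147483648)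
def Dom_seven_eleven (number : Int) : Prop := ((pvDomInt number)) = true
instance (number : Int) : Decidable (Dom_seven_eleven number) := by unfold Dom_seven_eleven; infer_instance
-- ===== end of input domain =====

-- B replaces A's O(n) filtering loop with an O(1) inclusion-exclusion of triangular-number sums.

-- ===== PORT A =====
def seven_eleven (number : Int) : Int :=
  if number < 1 then 0
  else
    ((PySem.List.pyRange 1 number 1).foldl
      (fun acc x => if PySem.Int.mod x 7 == 0 || PySem.Int.mod x 11 == 0 then acc ++ [x] else acc) []).sum

-- ===== PORT B =====
-- sum of the multiples of k in [1, number-1], via the triangular number of (number-1)//k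
def pvTri (number k : Int) : Int :=
  k * PySem.Int.floordiv
    (PySem.Int.floordiv (number - 1) k * (PySem.Int.floordiv (number - 1) k + 1)) 2

def seven_eleven_alt (number : Int) : Int :=
  if number < 1 then 0
  else pvTri number 7 + pvTri number 11 - pvTri number 77

-- ===== PRECONDITION & SPEC =====
def Spec_seven_eleven (number : Int) (out : Int) : Prop := out = seven_eleven_alt number
instance (number : Int) (out : Int) : Decidable (Spec_seven_eleven number out) := by unfold Spec_seven_eleven; infer_instance

-- ===== CLAIM (what is proved, stated in full; the proofs are below) =====
def Claim_equal_seven_eleven : Prop := ∀ (number : Int), Dom_seven_eleven number → Spec_seven_eleven number (seven_eleven number)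

-- ===== LEMMAS AND PROOFS =====

-- triangular numbers with ediv: the successor step
lemma pv_half_step (m : Int) : (m + 1) * (m + 2) / 2 = m * (m + 1) / 2 + (m + 1) := by
  obtain ⟨t, ht⟩ := Int.even_mul_succ_self m
  have h1 : m * (m + 1) = 2 * t := by rw [ht]; ring
  have h2 : (m + 1) * (m + 2) = 2 * (t + (m + 1)) := by linear_combination h1
  rw [h1, h2, Int.mul_ediv_cancel_left _ (by norm_num), Int.mul_ediv_cancel_left _ (by norm_num)]

-- (n-1)//k when k divides n: one less than n//k
lemma pv_mdiv_dvd (k n : Int) (hk : 0 < k) (hdvd : k ∣ n) :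
    (n - 1) / k = n / k - 1 := by
  obtain ⟨q, rfl⟩ := hdvd
  have h1 : k * q - 1 = (k - 1) + (q - 1) * k := by ring
  rw [h1, Int.add_mul_ediv_right _ _ (by omega), Int.ediv_eq_zero_of_lt (by omega) (by omega),
    Int.mul_ediv_cancel_left _ (by omega)]
  ring

-- (n-1)//k when k does not divide n: equal to n//k
lemma pv_mdiv_not_dvd (k n : Int) (hk : 0 < k) (hdvd : ¬ k ∣ n) :
    (n - 1) / k = n / k := by
  have hmod := Int.mul_ediv_add_emod n k
  have hr0 : 0 ≤ n % k := Int.emod_nonneg n (by omega)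
  have hrk : n % k < k := Int.emod_lt_of_pos n hk
  have hrne : n % k ≠ 0 := fun h => hdvd (Int.dvd_of_emod_eq_zero h)
  have h1 : n - 1 = (n % k - 1) + k * (n / k) := by linarith
  have h2 : n = (n % k) + k * (n / k) := by linarith
  rw [h1, Int.add_mul_ediv_left _ _ (by omega), Int.ediv_eq_zero_of_lt (by omega) (by omega)]
  conv_rhs => rw [h2, Int.add_mul_ediv_left _ _ (by omega), Int.ediv_eq_zero_of_lt (by omega) (by omega)]

-- the step of one inclusion-exclusion term
lemma pv_tri_step (k n : Int) (hk : 0 < k) (_hn : 1 ≤ n) :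
    pvTri (n + 1) k = pvTri n k + (if k ∣ n then n else 0) := by
  unfold pvTri
  rw [PySem.Int.floordiv_eq_ediv_of_pos hk, PySem.Int.floordiv_eq_ediv_of_pos hk,
    PySem.Int.floordiv_eq_ediv_of_pos (show (0:Int) < 2 by norm_num),
    PySem.Int.floordiv_eq_ediv_of_pos (show (0:Int) < 2 by norm_num)]
  simp only [add_sub_cancel_right]
  by_cases hdvd : k ∣ n
  · have hm : (n - 1) / k = n / k - 1 := pv_mdiv_dvd k n hk hdvd
    rw [hm, if_pos hdvd]
    have hstep := pv_half_step (n / k - 1)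
    have h2 : (n / k - 1 + 1) * (n / k - 1 + 2) = n / k * (n / k + 1) := by ring
    have h3 : (n / k - 1) * (n / k - 1 + 1) = (n / k - 1) * (n / k) := by ring
    rw [h2, h3] at hstep
    have h4 : (n / k - 1) * (n / k - 1 + 1) = (n / k - 1) * (n / k) := by ring
    rw [h4, hstep]
    have h5 : k * (n / k) = n := Int.mul_ediv_cancel' hdvd
    linarith [h5]
  · rw [pv_mdiv_not_dvd k n hk hdvd, if_neg hdvd, add_zero]

-- the closed form's step combined over 7, 11, 77 by inclusion-exclusion
lemma pv_mod_eq_decide (n k : Int) : (PySem.Int.mod n k == 0) = decide (k ∣ n) := by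
  cases h : PySem.Int.mod n k == 0
  · have : ¬ k ∣ n := by rw [← PySem.Int.mod_eq_zero_iff_dvd]; simpa using h
    simp [this]
  · have : k ∣ n := by rw [← PySem.Int.mod_eq_zero_iff_dvd]; simpa using h
    simp [this]

lemma pv_alt_step (n : Int) (hn : 1 ≤ n) :
    seven_eleven_alt (n + 1) =
      seven_eleven_alt n + (if PySem.Int.mod n 7 == 0 || PySem.Int.mod n 11 == 0 then n else 0) := by
  unfold seven_eleven_alt
  rw [if_neg (by omega), if_neg (by omega),
    pv_tri_step 7 n (by norm_num) hn, pv_tri_step 11 n (by norm_num) hn,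
    pv_tri_step 77 n (by norm_num) hn,
    pv_mod_eq_decide n 7, pv_mod_eq_decide n 11]
  have h77 : ((77:Int) ∣ n) ↔ ((7:Int) ∣ n ∧ (11:Int) ∣ n) := by omega
  by_cases d7 : (7 : Int) ∣ n <;> by_cases d11 : (11 : Int) ∣ n <;>
    simp [h77, d7, d11] <;> ring

-- A as a filtered sum over the range
lemma pv_a_sum (n : Int) :
    seven_eleven n = if n < 1 then 0 else
      ((PySem.List.pyRange 1 n 1).filter
        (fun x => PySem.Int.mod x 7 == 0 || PySem.Int.mod x 11 == 0)).sum := by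
  unfold seven_eleven
  split_ifs with h
  · rfl
  · rw [PySem.List.foldl_append_if_eq_filter, List.nil_append]

-- the induction: A = B on 1 ≤ n
lemma pv_main (n : Int) (hn : 1 ≤ n) : seven_eleven n = seven_eleven_alt n := by
  induction n, hn using Int.le_induction with
  | base => decide
  | succ m hm ih =>
    rw [pv_a_sum] at ih ⊢
    rw [if_neg (by omega)] at ih
    rw [if_neg (by omega)]
    rw [PySem.List.pyRange_one_succ_right (by omega), List.filter_append, List.sum_append,
      pv_alt_step m hm, ← ih, List.filter_singleton]
    cases hc : (PySem.Int.mod m 7 == 0 || PySem.Int.mod m 11 == 0) with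
    | false => simp only [cond_false, List.sum_nil]; simp
    | true => simp only [cond_true, List.sum_cons, List.sum_nil, add_zero]; simp

-- ===== VERDICT (by name: the statement is the Claim_ definition above) =====
theorem seven_eleven_spec : Claim_equal_seven_eleven := by
  intro n _
  unfold Spec_seven_eleven
  by_cases h : n < 1
  · unfold seven_eleven seven_eleven_alt
    rw [if_pos h, if_pos h]
  · exact pv_main n (by omega)
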